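-- pv_equiv track=rewrite | github.com/PunnyOz/2110101_ComProg | Grader/07_StrFile_32.py | ch
-- ===== SOURCE A (Python) =====
-- def ch(t, c):
--     cou = [0] * len(t)
--     t = t.upper()
--     if t[0] in c:
--         cou[0] = 1
--     for i in range(1, len(t)):
--         if t[i] in c:
--             cou[i] = 1
--             if t[i-1] in c and c.index(t[i-1]) == c.index(t[i]) - 1 + (len(c) if c.index(t[i]) == 0 else 0):
--                 cou[i] += cou[i-1]
--         if cou[i] >= 4:
--             return True
--     cou = [0] * len(t)
--     c = c[::-1]
--     if t[0] in c:
--         cou[0] = 1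
--     for i in range(1, len(t)):
--         if t[i] in c:
--             cou[i] = 1
--             if t[i-1] in c and c.index(t[i-1]) == c.index(t[i]) - 1 + (len(c) if c.index(t[i]) == 0 else 0):
--                 cou[i] += cou[i-1]
--         if cou[i] >= 4:
--             return True
--     return False
-- ===== SOURCE B (Python) =====
-- def ch(t, c):
--     t = t.upper()
--     r = c[::-1]
--     n = len(c)
--     def succ(s, a, b):
--         return a in s and b in s and s.index(a) == (s.index(b) - 1) % n
--     for i in range(3, len(t)):
--         if (succ(c, t[i-3], t[i-2]) and succ(c, t[i-2], t[i-1]) and succ(c, t[i-1], t[i])) or \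
--            (succ(r, t[i-3], t[i-2]) and succ(r, t[i-2], t[i-1]) and succ(r, t[i-1], t[i])):
--             return True
--     return False
-- ===== Notes on version B (the rewrite author's own statement) =====
-- stated objective: simpler
-- what changed: Replaces A's two sequential dynamic-programming passes (a per-index run-length counter array for c and again for reversed c) by one stateless pass that tests each 4-character window directly for a cyclically-consecutive chain, folding A's '-1 + (len(c) if index==0 else 0)' wrap-around into a single (i-1) % n.
import Mathlib
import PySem

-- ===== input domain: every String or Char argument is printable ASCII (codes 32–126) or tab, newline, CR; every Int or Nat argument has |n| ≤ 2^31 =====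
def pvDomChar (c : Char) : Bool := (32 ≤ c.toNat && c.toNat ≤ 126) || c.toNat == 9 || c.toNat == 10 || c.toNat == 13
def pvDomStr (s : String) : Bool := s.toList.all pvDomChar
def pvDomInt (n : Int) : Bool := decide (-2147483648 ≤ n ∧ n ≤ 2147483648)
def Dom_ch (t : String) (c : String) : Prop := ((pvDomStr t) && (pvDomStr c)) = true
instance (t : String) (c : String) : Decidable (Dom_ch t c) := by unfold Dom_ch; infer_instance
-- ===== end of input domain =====

-- B replaces A's two sequential run-length-counter passes (forward c, then reversed c) by one
-- stateless pass testing each 4-character window for a cyclically-consecutive chain (objective: simpler).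

-- ===== PORT A =====
-- c.index(x) for a single char x already known to be in c (Python str.index = first occurrence)
def chIdx (c : List Char) (x : Char) : Int := ((PySem.List.index? c x).getD 0 : Nat)

-- the inner condition 't[i-1] in c and c.index(t[i-1]) == c.index(t[i]) - 1 + (len(c) if c.index(t[i]) == 0 else 0)'
def chCond (c : List Char) (prev cur : Char) : Bool :=
  c.contains prev &&
    (chIdx c prev == chIdx c cur - 1 + (if chIdx c cur == 0 then (c.length : Int) else 0))

-- the body of A's loop at index i: 'if t[i] in c: cou[i] = 1; if …: cou[i] += cou[i-1]'
def chStep (c L : List Char) (cou : List Int) (i : Nat) : List Int :=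
  if c.contains (L.getD i ' ') then
    cou.set i (if chCond c (L.getD (i-1) ' ') (L.getD i ' ') then 1 + cou.getD (i-1) 0 else 1)
  else cou

-- the 'for i in range(1, len(t))' loop of A, with the cou array as state and early return True
-- (fuel = number of remaining iterations, purely a termination device)
def chLoopGo (c L : List Char) : Nat → List Int → Nat → Bool
  | 0, _, _ => false
  | (d+1), cou, i =>
    let cou' := chStep c L cou i
    if 4 ≤ cou'.getD i 0 then true else chLoopGo c L d cou' (i+1)

def chLoop (c L : List Char) (cou : List Int) (i : Nat) : Bool :=
  chLoopGo c L (L.length - i) cou i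

-- one pass of A's body: cou = [0]*len(t); cou[0] init; then the loop (run once for c, once for c[::-1])
def chScan (c L : List Char) : Bool :=
  let cou := List.replicate L.length (0 : Int)
  let cou := if c.contains (L.getD 0 ' ') then cou.set 0 1 else cou
  chLoop c L cou 1

def ch (t : String) (c : String) : Bool :=
  let L := PySem.Chars.upper t.toList
  let cl := c.toList
  if chScan cl L then true else chScan cl.reverse L

-- ===== PORT B =====
-- succ(s, a, b) of Source B: a in s and b in s and s.index(a) == (s.index(b) - 1) % n
def chSucc (s : List Char) (n : Int) (a b : Char) : Bool :=
  s.contains a && (s.contains b && (chIdx s a == PySem.Int.mod (chIdx s b - 1) n))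

-- the window test at position i (the three 'succ' conjuncts of Source B for one s)
def chWin (s : List Char) (n : Int) (L : List Char) (i : Nat) : Bool :=
  chSucc s n (L.getD (i-3) ' ') (L.getD (i-2) ' ') &&
  chSucc s n (L.getD (i-2) ' ') (L.getD (i-1) ' ') &&
  chSucc s n (L.getD (i-1) ' ') (L.getD i ' ')

-- Source B's 'for i in range(3, len(t))' loop
def chAltLoopGo (cl r : List Char) (n : Int) (L : List Char) : Nat → Nat → Bool
  | 0, _ => false
  | (d+1), i =>
    if chWin cl n L i || chWin r n L i then true else chAltLoopGo cl r n L d (i+1)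

def chAltLoop (cl r : List Char) (n : Int) (L : List Char) (i : Nat) : Bool :=
  chAltLoopGo cl r n L (L.length - i) i

def ch_alt (t : String) (c : String) : Bool :=
  let L := PySem.Chars.upper t.toList
  let cl := c.toList
  chAltLoop cl cl.reverse (cl.length : Int) L 3

-- ===== PRECONDITION & SPEC =====
-- Pre_ excludes only empty t, on which A raises IndexError at t[0] (B returns False there).
def Pre_ch (t : String) (c : String) : Prop := t ≠ ""
instance (t : String) (c : String) : Decidable (Pre_ch t c) := by unfold Pre_ch; infer_instance
def pvWitness_ch : String × String := ("deadbeef", "ABCD")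

def Spec_ch (t : String) (c : String) (out : Bool) : Prop := out = ch_alt t c
instance (t : String) (c : String) (out : Bool) : Decidable (Spec_ch t c out) := by unfold Spec_ch; infer_instance

-- ===== CLAIM (what is proved, stated in full; the proofs are below) =====
def Claim_equal_ch : Prop := ∀ (t : String) (c : String), Dom_ch t c → Pre_ch t c → Spec_ch t c (ch t c)

-- ===== LEMMAS AND PROOFS =====

-- run-length counter that A's cou array tracks: cou[i] after iteration i equals chRun i
def chRun (s L : List Char) : Nat → Int
  | 0 => if s.contains (L.getD 0 ' ') then 1 else 0
  | (i+1) =>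
    if s.contains (L.getD (i+1) ' ') then
      (if chCond s (L.getD i ' ') (L.getD (i+1) ' ') then 1 + chRun s L i else 1)
    else 0

lemma chRun_nonneg (s L : List Char) (i : Nat) : 0 ≤ chRun s L i := by
  induction i with
  | zero => unfold chRun; split <;> norm_num
  | succ i ih => unfold chRun; split_ifs <;> omega

lemma chRun_le (s L : List Char) (i : Nat) : chRun s L i ≤ i + 1 := by
  induction i with
  | zero => unfold chRun; split <;> norm_num
  | succ i ih => unfold chRun; push_cast; split_ifs <;> omega

lemma chRun_ge_one (s L : List Char) (i : Nat) :
    1 ≤ chRun s L i ↔ s.contains (L.getD i ' ') = true := by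
  cases i with
  | zero =>
    unfold chRun; split_ifs with h
    · exact iff_of_true (by norm_num) h
    · exact iff_of_false (by norm_num) h
  | succ i =>
    unfold chRun
    split_ifs with h h2
    · have := chRun_nonneg s L i
      exact iff_of_true (by omega) h
    · exact iff_of_true (by norm_num) h
    · exact iff_of_false (by norm_num) h

lemma chRun_ge_succ (s L : List Char) (i : Nat) (k : Int) (hk : 1 ≤ k) :
    k + 1 ≤ chRun s L (i+1) ↔
      (s.contains (L.getD (i+1) ' ') = true ∧ chCond s (L.getD i ' ') (L.getD (i+1) ' ') = true
        ∧ k ≤ chRun s L i) := by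
  conv_lhs => rw [chRun]
  split_ifs with h h2
  · constructor
    · intro hh; exact ⟨h, h2, by omega⟩
    · rintro ⟨-, -, hh⟩; omega
  · exact iff_of_false (by omega) (fun ⟨_, hc, _⟩ => h2 hc)
  · exact iff_of_false (by omega) (fun ⟨hc, _, _⟩ => h hc)

-- facts about one step of A's loop
lemma length_chStep (s L : List Char) (cou : List Int) (i : Nat) :
    (chStep s L cou i).length = cou.length := by
  unfold chStep; split <;> simp

lemma chStep_getD_self (s L : List Char) (cou : List Int) (i : Nat)
    (hi : i + 1 < cou.length)
    (hprev : cou.getD i 0 = chRun s L i)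
    (hcur : cou.getD (i+1) 0 = 0) :
    (chStep s L cou (i+1)).getD (i+1) 0 = chRun s L (i+1) := by
  unfold chStep
  simp only [Nat.add_sub_cancel]
  conv_rhs => rw [chRun]
  have hset : ∀ (v : Int), (cou.set (i+1) v).getD (i+1) 0 = v := by
    intro v
    rw [List.getD_eq_getElem?_getD, List.getElem?_set_self hi]
    rfl
  split_ifs with h h2
  · rw [hset, hprev]
  · rw [hset]
  · exact hcur

lemma chStep_getD_of_lt (s L : List Char) (cou : List Int) (i j : Nat) (hj : i < j) :
    (chStep s L cou i).getD j 0 = cou.getD j 0 := by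
  unfold chStep
  split
  · rw [List.getD_eq_getElem?_getD, List.getElem?_set_ne (by omega), ← List.getD_eq_getElem?_getD]
  · rfl

-- the loop invariant lemma for A's loop
lemma chLoopGo_iff (s L : List Char) : ∀ (d i : Nat) (cou : List Int), i + d = L.length → 1 ≤ i →
    cou.length = L.length →
    cou.getD (i-1) 0 = chRun s L (i-1) →
    (∀ j, i ≤ j → j < cou.length → cou.getD j 0 = 0) →
    (chLoopGo s L d cou i = true ↔ ∃ j, i ≤ j ∧ j < L.length ∧ 4 ≤ chRun s L j) := by
  intro d
  induction d with
  | zero =>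
    intro i cou hi h1 hlen hprev hz
    rw [chLoopGo]
    constructor
    · intro h; simp at h
    · rintro ⟨j, hj1, hj2, _⟩; omega
  | succ d ih =>
    intro i cou hi h1 hlen hprev hz
    rw [chLoopGo]
    have hlt : i < L.length := by omega
    obtain ⟨i', rfl⟩ : ∃ i', i = i' + 1 := ⟨i - 1, by omega⟩
    have hprev' : cou.getD i' 0 = chRun s L i' := by simpa using hprev
    have hati : (chStep s L cou (i'+1)).getD (i'+1) 0 = chRun s L (i'+1) :=
      chStep_getD_self s L cou i' (by omega) hprev'
        (hz (i'+1) (le_refl _) (by omega))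
    have hlen' : (chStep s L cou (i'+1)).length = L.length := by
      rw [length_chStep, hlen]
    have hz' : ∀ j, i'+2 ≤ j → j < (chStep s L cou (i'+1)).length →
        (chStep s L cou (i'+1)).getD j 0 = 0 := by
      intro j hj hj2
      rw [chStep_getD_of_lt s L cou (i'+1) j (by omega)]
      exact hz j (by omega) (by rw [hlen]; omega)
    show (if 4 ≤ (chStep s L cou (i'+1)).getD (i'+1) 0 then true
          else chLoopGo s L d (chStep s L cou (i'+1)) (i'+2)) = true ↔ _
    rw [hati]
    by_cases h4 : 4 ≤ chRun s L (i'+1)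
    · rw [if_pos h4]
      exact iff_of_true rfl ⟨i'+1, le_refl _, hlt, h4⟩
    · rw [if_neg h4]
      rw [ih (i'+2) (chStep s L cou (i'+1)) (by omega) (by omega) hlen'
          (by simpa using hati) hz']
      constructor
      · rintro ⟨j, hj1, hj2, hj3⟩; exact ⟨j, by omega, hj2, hj3⟩
      · rintro ⟨j, hj1, hj2, hj3⟩
        refine ⟨j, ?_, hj2, hj3⟩
        rcases Nat.eq_or_lt_of_le hj1 with heq | hlt2
        · exact absurd (heq ▸ hj3) h4
        · omega

lemma chScan_iff (s L : List Char) (hL : L ≠ []) :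
    (chScan s L = true ↔ ∃ j, 1 ≤ j ∧ j < L.length ∧ 4 ≤ chRun s L j) := by
  have hlen1 : 0 < L.length := List.length_pos_iff.mpr hL
  show chLoopGo s L (L.length - 1)
      (if s.contains (L.getD 0 ' ') then (List.replicate L.length (0:Int)).set 0 1
       else List.replicate L.length (0:Int)) 1 = true ↔ _
  apply chLoopGo_iff s L (L.length - 1) 1 _ (by omega) (by omega)
  · split <;> simp
  · show (if s.contains (L.getD 0 ' ') then (List.replicate L.length (0:Int)).set 0 1
          else List.replicate L.length (0:Int)).getD 0 0 = chRun s L 0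
    rw [chRun]
    split_ifs with h
    · rw [List.getD_eq_getElem?_getD, List.getElem?_set_self (by simpa using hlen1)]
      rfl
    · simp
  · intro j hj hj2
    split_ifs with h
    · rw [List.getD_eq_getElem?_getD, List.getElem?_set_ne (by omega)]
      simp
    · simp

-- extracting membership of the left char from A's inner condition
lemma chCond_contains_left (s : List Char) (a b : Char) (h : chCond s a b = true) :
    s.contains a = true := by
  unfold chCond at h
  rw [Bool.and_eq_true] at h
  exact h.1

-- succ of B ↔ (A's inner condition ∧ membership of the right char), for n = s.length
lemma chSucc_iff (s : List Char) (a b : Char) :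
    chSucc s (s.length : Int) a b = true ↔
      (chCond s a b = true ∧ s.contains b = true) := by
  by_cases ha : s.contains a = true
  · by_cases hb : s.contains b = true
    · obtain ⟨ka, hka⟩ := Option.isSome_iff_exists.mp
        ((PySem.List.index?_isSome_iff s a).mpr (by simpa using ha))
      obtain ⟨kb, hkb⟩ := Option.isSome_iff_exists.mp
        ((PySem.List.index?_isSome_iff s b).mpr (by simpa using hb))
      obtain ⟨hka2, -, -⟩ := PySem.List.getElem_of_index?_eq_some hka
      obtain ⟨hkb2, -, -⟩ := PySem.List.getElem_of_index?_eq_some hkb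
      have hn : (0:Int) < (s.length : Int) := by exact_mod_cast Nat.zero_lt_of_lt hka2
      have hkbi : ((kb : Nat) : Int) < (s.length : Int) := by exact_mod_cast hkb2
      unfold chSucc chCond chIdx
      rw [hka, hkb]
      simp only [ha, hb, Option.getD_some, Bool.true_and, beq_iff_eq, and_true]
      rw [PySem.Int.mod_eq_emod_of_pos hn]
      have harith : (((kb:Nat):Int) - 1) % ((s.length:Nat):Int) =
          ((kb:Nat):Int) - 1 + (if ((kb:Nat):Int) = 0 then ((s.length:Nat):Int) else 0) := by
        split_ifs with h
        · rw [show (((kb:Nat):Int) - 1) = ((s.length:Nat):Int) - 1 - ((s.length:Nat):Int) by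
            rw [h]; ring, Int.sub_emod_right, Int.emod_eq_of_lt (by omega) (by omega)]
          omega
        · rw [Int.emod_eq_of_lt (by omega) (by omega)]
          omega
      rw [harith]
    · have hb' : ¬ (b ∈ s) := fun hm => hb (by simpa using hm)
      refine iff_of_false ?_ (fun h => hb h.2)
      simp [chSucc, hb']
  · have ha' : ¬ (a ∈ s) := fun hm => ha (by simpa using hm)
    refine iff_of_false ?_ (fun h => ha (chCond_contains_left s a b h.1))
    simp [chSucc, ha']

-- 4 ≤ chRun at j ↔ j ≥ 3 and the window test of B holds at j
lemma chRun_four_iff (s L : List Char) (j : Nat) :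
    (4 ≤ chRun s L j) ↔ (3 ≤ j ∧ chWin s (s.length : Int) L j = true) := by
  by_cases hj : 3 ≤ j
  · obtain ⟨i, rfl⟩ : ∃ i, j = i + 3 := ⟨j - 3, by omega⟩
    have e3 : i + 3 - 3 = i := by omega
    have e2 : i + 3 - 2 = i + 1 := by omega
    have e1 : i + 3 - 1 = i + 2 := by omega
    constructor
    · intro h4
      obtain ⟨c3, d3, h3⟩ := (chRun_ge_succ s L (i+2) 3 (by norm_num)).mp h4
      obtain ⟨c2, d2, h2⟩ := (chRun_ge_succ s L (i+1) 2 (by norm_num)).mp h3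
      obtain ⟨c1, d1, h1⟩ := (chRun_ge_succ s L i 1 (le_refl 1)).mp h2
      refine ⟨by omega, ?_⟩
      unfold chWin
      rw [e1, e2, e3]
      simp only [Bool.and_eq_true]
      exact ⟨⟨(chSucc_iff s _ _).mpr ⟨d1, c1⟩, (chSucc_iff s _ _).mpr ⟨d2, c2⟩⟩,
        (chSucc_iff s _ _).mpr ⟨d3, c3⟩⟩
    · rintro ⟨-, hw⟩
      unfold chWin at hw
      rw [e1, e2, e3] at hw
      simp only [Bool.and_eq_true] at hw
      obtain ⟨⟨s1, s2⟩, s3⟩ := hw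
      obtain ⟨d1, c1⟩ := (chSucc_iff s _ _).mp s1
      obtain ⟨d2, c2⟩ := (chSucc_iff s _ _).mp s2
      obtain ⟨d3, c3⟩ := (chSucc_iff s _ _).mp s3
      exact (chRun_ge_succ s L (i+2) 3 (by norm_num)).mpr ⟨c3, d3,
        (chRun_ge_succ s L (i+1) 2 (by norm_num)).mpr ⟨c2, d2,
          (chRun_ge_succ s L i 1 (le_refl 1)).mpr ⟨c1, d1,
            (chRun_ge_one s L i).mpr (chCond_contains_left s _ _ d1)⟩⟩⟩
  · refine iff_of_false (fun h => ?_) (fun h => hj h.1)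
    have := chRun_le s L j
    omega

lemma chAltLoopGo_iff (cl r L : List Char) (n : Int) : ∀ (d i : Nat), i + d = L.length →
    (chAltLoopGo cl r n L d i = true ↔
      ∃ j, i ≤ j ∧ j < L.length ∧ (chWin cl n L j = true ∨ chWin r n L j = true)) := by
  intro d
  induction d with
  | zero =>
    intro i hi
    rw [chAltLoopGo]
    constructor
    · intro h; simp at h
    · rintro ⟨j, h1, h2, _⟩; omega
  | succ d ih =>
    intro i hi
    rw [chAltLoopGo]
    by_cases hw : (chWin cl n L i || chWin r n L i) = true
    · rw [if_pos hw]
      exact iff_of_true rfl ⟨i, le_refl _, by omega, by simpa using hw⟩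
    · rw [if_neg hw]
      rw [ih (i+1) (by omega)]
      constructor
      · rintro ⟨j, h1, h2, h3⟩; exact ⟨j, by omega, h2, h3⟩
      · rintro ⟨j, h1, h2, h3⟩
        refine ⟨j, ?_, h2, h3⟩
        rcases Nat.eq_or_lt_of_le h1 with heq | hlt2
        · exact absurd (by simpa using (heq ▸ h3)) hw
        · omega

-- A's scan result, phrased as B's window existential
lemma chScan_iff_win (s L : List Char) (hL : L ≠ []) :
    (chScan s L = true ↔
      ∃ j, 3 ≤ j ∧ j < L.length ∧ chWin s (s.length : Int) L j = true) := by
  rw [chScan_iff s L hL]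
  constructor
  · rintro ⟨j, -, hj2, hj3⟩
    obtain ⟨h3, hw⟩ := (chRun_four_iff s L j).mp hj3
    exact ⟨j, h3, hj2, hw⟩
  · rintro ⟨j, h3, hj2, hw⟩
    exact ⟨j, by omega, hj2, (chRun_four_iff s L j).mpr ⟨h3, hw⟩⟩

-- ===== VERDICT (by name: the statement is the Claim_ definition above) =====
theorem ch_spec : Claim_equal_ch := by
  intro t c hdom hpre
  have htl : t.toList ≠ [] := fun hl => hpre (String.toList_inj.mp (by simpa using hl))
  have hL : PySem.Chars.upper t.toList ≠ [] := by
    unfold PySem.Chars.upper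
    intro h
    exact htl (List.map_eq_nil_iff.mp h)
  show ch t c = ch_alt t c
  have hch : ch t c = (chScan c.toList (PySem.Chars.upper t.toList)
      || chScan c.toList.reverse (PySem.Chars.upper t.toList)) := by
    show (if chScan c.toList (PySem.Chars.upper t.toList) = true then true
          else chScan c.toList.reverse (PySem.Chars.upper t.toList)) = _
    cases chScan c.toList (PySem.Chars.upper t.toList) <;> simp
  have halt : ch_alt t c = chAltLoopGo c.toList c.toList.reverse (c.toList.length : Int)
      (PySem.Chars.upper t.toList) ((PySem.Chars.upper t.toList).length - 3) 3 := rfl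
  rw [hch, halt, Bool.eq_iff_iff, Bool.or_eq_true]
  rw [chScan_iff_win c.toList _ hL, chScan_iff_win c.toList.reverse _ hL]
  by_cases h3 : 3 ≤ (PySem.Chars.upper t.toList).length
  · rw [chAltLoopGo_iff c.toList c.toList.reverse _ _ _ 3 (by omega)]
    simp only [List.length_reverse]
    constructor
    · rintro (⟨j, h1, h2, hw⟩ | ⟨j, h1, h2, hw⟩)
      · exact ⟨j, h1, h2, Or.inl hw⟩
      · exact ⟨j, h1, h2, Or.inr hw⟩
    · rintro ⟨j, h1, h2, hw | hw⟩
      · exact Or.inl ⟨j, h1, h2, hw⟩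
      · exact Or.inr ⟨j, h1, h2, hw⟩
  · rw [show (PySem.Chars.upper t.toList).length - 3 = 0 by omega, chAltLoopGo]
    simp only [List.length_reverse]
    constructor
    · rintro (⟨j, h1, h2, _⟩ | ⟨j, h1, h2, _⟩) <;> omega
    · intro h; simp at h
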